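-- pv_equiv track=rewrite | github.com/WilsonWangTHU/NerveNet | environments/reacher_generator.py | _add_body
-- ===== SOURCE A (Python) =====
-- POD_XML_HEAD = '''
-- <body name="body_{POD_ID}" pos="0.1 0 0">
--   <joint axis="0 0 1" limited="true" name="joint_{POD_ID}" pos="0 0 0" range="-3.0 3.0" type="hinge"/>
--   <geom fromto="0 0 0 0.1 0 0" name="link_{POD_ID}" rgba="0.0 0.4 0.6 1" size=".01" type="capsule"/>
-- '''
--
-- FINGER_TIP_XML = '''
-- <geom contype="0" name="fingertip" pos="0.11 0 0" rgba="0.0 0.8 0.6 1" size=".01" type="sphere"/>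
-- <site name="tip" pos="0.11 0 0" size="0.001 0.001"/>
-- '''
--
-- def _add_body(xml_content, current_pod_id, indent_level, num_pods):
--     if num_pods - 1 < 0:
--         body_xml_list = ['  ' * indent_level + lines
--                          for lines in FINGER_TIP_XML.split('\n')]
--         return xml_content + ('\n'.join(body_xml_list) + '\n')
--
--     # add the body head xml
--     body_xml_head = POD_XML_HEAD.replace('{POD_ID}', str(current_pod_id))
--     body_xml_list = ['  ' * indent_level + lines
--                      for lines in body_xml_head.split('\n')]
--     xml_content += ('\n'.join(body_xml_list) + '\n')
--
--     # add another layer of body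
--     xml_content = _add_body(
--         xml_content, current_pod_id + 1,
--         indent_level + 1, num_pods - 1
--     )
--
--     # add the body tail xml
--     xml_content += ('  ' * indent_level + '</body>\n')
--     return xml_content
-- ===== SOURCE B (Python) =====
-- POD_XML_HEAD = '''
-- <body name="body_{POD_ID}" pos="0.1 0 0">
--   <joint axis="0 0 1" limited="true" name="joint_{POD_ID}" pos="0 0 0" range="-3.0 3.0" type="hinge"/>
--   <geom fromto="0 0 0 0.1 0 0" name="link_{POD_ID}" rgba="0.0 0.4 0.6 1" size=".01" type="capsule"/>
-- '''
--
-- FINGER_TIP_XML = '''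
-- <geom contype="0" name="fingertip" pos="0.11 0 0" rgba="0.0 0.8 0.6 1" size=".01" type="sphere"/>
-- <site name="tip" pos="0.11 0 0" size="0.001 0.001"/>
-- '''
--
--
-- def _indented(block, indent_level):
--     return '\n'.join('  ' * indent_level + line
--                      for line in block.split('\n')) + '\n'
--
--
-- def _add_body(xml_content, current_pod_id, indent_level, num_pods):
--     result = xml_content
--     if num_pods <= 0:
--         return result + _indented(FINGER_TIP_XML, indent_level)
--     for i in range(num_pods):
--         head = POD_XML_HEAD.replace('{POD_ID}', str(current_pod_id + i))
--         result += _indented(head, indent_level + i)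
--     result += _indented(FINGER_TIP_XML, indent_level + num_pods)
--     for i in range(num_pods - 1, -1, -1):
--         result += '  ' * (indent_level + i) + '</body>\n'
--     return result
-- ===== Notes on version B (the rewrite author's own statement) =====
-- stated objective: alternative
-- what changed: Replaces the recursion with an explicit iterative decomposition: one forward loop emits all pod headers, then the fingertip block, then a backward loop emits the closing </body> tags, instead of recursing one pod at a time.
import Mathlib
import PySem

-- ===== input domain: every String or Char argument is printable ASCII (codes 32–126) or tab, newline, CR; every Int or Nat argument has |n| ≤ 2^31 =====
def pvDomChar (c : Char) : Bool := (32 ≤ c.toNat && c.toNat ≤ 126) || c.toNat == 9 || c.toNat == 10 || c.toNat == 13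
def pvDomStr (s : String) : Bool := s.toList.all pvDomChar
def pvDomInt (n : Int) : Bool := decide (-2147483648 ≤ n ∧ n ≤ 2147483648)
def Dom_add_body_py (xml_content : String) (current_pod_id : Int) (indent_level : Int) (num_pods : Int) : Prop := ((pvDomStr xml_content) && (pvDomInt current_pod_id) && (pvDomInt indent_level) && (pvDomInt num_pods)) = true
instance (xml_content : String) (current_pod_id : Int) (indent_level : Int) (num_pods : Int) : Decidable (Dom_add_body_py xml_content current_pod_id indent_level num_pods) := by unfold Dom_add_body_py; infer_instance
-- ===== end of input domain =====

-- B replaces A's recursion by an iterative decomposition (forward loop of pod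
-- headers, fingertip block, backward loop of closing tags); same return value.

def POD_XML_HEAD : String := "\n<body name=\"body_{POD_ID}\" pos=\"0.1 0 0\">\n  <joint axis=\"0 0 1\" limited=\"true\" name=\"joint_{POD_ID}\" pos=\"0 0 0\" range=\"-3.0 3.0\" type=\"hinge\"/>\n  <geom fromto=\"0 0 0 0.1 0 0\" name=\"link_{POD_ID}\" rgba=\"0.0 0.4 0.6 1\" size=\".01\" type=\"capsule\"/>\n"

def FINGER_TIP_XML : String := "\n<geom contype=\"0\" name=\"fingertip\" pos=\"0.11 0 0\" rgba=\"0.0 0.8 0.6 1\" size=\".01\" type=\"sphere\"/>\n<site name=\"tip\" pos=\"0.11 0 0\" size=\"0.001 0.001\"/>\n"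

-- Python '  ' * n (empty for n ≤ 0); exact via PySem.List.pyRepeat
def pvIndent (n : Int) : String := String.ofList (PySem.List.pyRepeat "  ".toList n)

-- ===== PORT A =====
def add_body_py (xml_content : String) (current_pod_id : Int) (indent_level : Int) (num_pods : Int) : String :=
  if num_pods - 1 < 0 then
    let body_xml_list := ((PySem.Str.split? FINGER_TIP_XML "\n").getD []).map
      (fun lines => pvIndent indent_level ++ lines)
    xml_content ++ (PySem.Str.join "\n" body_xml_list ++ "\n")
  else
    let body_xml_head := PySem.Str.replace POD_XML_HEAD "{POD_ID}" (PySem.Int.toStr current_pod_id)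
    let body_xml_list := ((PySem.Str.split? body_xml_head "\n").getD []).map
      (fun lines => pvIndent indent_level ++ lines)
    let xml1 := xml_content ++ (PySem.Str.join "\n" body_xml_list ++ "\n")
    let xml2 := add_body_py xml1 (current_pod_id + 1) (indent_level + 1) (num_pods - 1)
    xml2 ++ (pvIndent indent_level ++ "</body>\n")
termination_by num_pods.toNat
decreasing_by omega

-- ===== PORT B =====
-- Source B's helper _indented
def pvIndented (block : String) (indent_level : Int) : String :=
  PySem.Str.join "\n" (((PySem.Str.split? block "\n").getD []).map
    (fun line => pvIndent indent_level ++ line)) ++ "\n"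

def add_body_py_alt (xml_content : String) (current_pod_id : Int) (indent_level : Int) (num_pods : Int) : String :=
  if num_pods ≤ 0 then
    xml_content ++ pvIndented FINGER_TIP_XML indent_level
  else
    let r1 := (PySem.List.pyRange 0 num_pods 1).foldl
      (fun s i => s ++ pvIndented
        (PySem.Str.replace POD_XML_HEAD "{POD_ID}" (PySem.Int.toStr (current_pod_id + i)))
        (indent_level + i)) xml_content
    let r2 := r1 ++ pvIndented FINGER_TIP_XML (indent_level + num_pods)
    (PySem.List.pyRange (num_pods - 1) (-1) (-1)).foldl
      (fun s i => s ++ (pvIndent (indent_level + i) ++ "</body>\n")) r2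

-- ===== PRECONDITION & SPEC =====
-- Pre_ excludes num_pods > 900: A recurses once per pod, so large num_pods hits
-- CPython's recursion limit and A raises RecursionError (threshold near 1000 and
-- stack-depth-dependent, hence the safety margin); B is iterative and returns the
-- same string wherever A still returns.
def Pre_add_body_py (xml_content : String) (current_pod_id : Int) (indent_level : Int) (num_pods : Int) : Prop := num_pods ≤ 900
instance (xml_content : String) (current_pod_id : Int) (indent_level : Int) (num_pods : Int) : Decidable (Pre_add_body_py xml_content current_pod_id indent_level num_pods) := by unfold Pre_add_body_py; infer_instance
def pvWitness_add_body_py : String × Int × Int × Int := ("", 0, 0, 2)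

def Spec_add_body_py (xml_content : String) (current_pod_id : Int) (indent_level : Int) (num_pods : Int) (out : String) : Prop := out = add_body_py_alt xml_content current_pod_id indent_level num_pods
instance (xml_content : String) (current_pod_id : Int) (indent_level : Int) (num_pods : Int) (out : String) : Decidable (Spec_add_body_py xml_content current_pod_id indent_level num_pods out) := by unfold Spec_add_body_py; infer_instance

-- ===== CLAIM (what is proved, stated in full; the proofs are below) =====
def Claim_equal_add_body_py : Prop := ∀ (xml_content : String) (current_pod_id : Int) (indent_level : Int) (num_pods : Int), Dom_add_body_py xml_content current_pod_id indent_level num_pods → Pre_add_body_py xml_content current_pod_id indent_level num_pods → Spec_add_body_py xml_content current_pod_id indent_level num_pods (add_body_py xml_content current_pod_id indent_level num_pods)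

-- ===== LEMMAS AND PROOFS =====

def headStr (id lvl : Int) : String :=
  pvIndented (PySem.Str.replace POD_XML_HEAD "{POD_ID}" (PySem.Int.toStr id)) lvl

def tailStr (lvl : Int) : String := pvIndent lvl ++ "</body>\n"

-- the suffix A appends, as a structural recursion on the pod count
def refSuffix : Nat → Int → Int → String
  | 0, _, lvl => pvIndented FINGER_TIP_XML lvl
  | n + 1, id, lvl => headStr id lvl ++ (refSuffix n (id + 1) (lvl + 1) ++ tailStr lvl)

def headsCat : Nat → Int → Int → String
  | 0, _, _ => ""
  | n + 1, id, lvl => headStr id lvl ++ headsCat n (id + 1) (lvl + 1)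

def tailsCat : Nat → Int → String
  | 0, _ => ""
  | n + 1, lvl => tailStr (lvl + n) ++ tailsCat n lvl

theorem A_eq (n : Nat) : ∀ (pods : Int), pods.toNat = n →
    ∀ (xml : String) (id lvl : Int),
    add_body_py xml id lvl pods = xml ++ refSuffix n id lvl := by
  induction n with
  | zero =>
    intro pods hp xml id lvl
    have h : pods - 1 < 0 := by omega
    rw [add_body_py]
    simp [h, refSuffix, pvIndented]
  | succ n ih =>
    intro pods hp xml id lvl
    have h : ¬ (pods - 1 < 0) := by omega
    rw [add_body_py]
    simp only [h, if_false]
    rw [ih (pods - 1) (by omega)]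
    simp [refSuffix, headStr, pvIndented, String.append_assoc, tailStr]

theorem heads_fold (n : Nat) : ∀ (a₀ id lvl : Int) (acc : String),
    (PySem.List.pyRange a₀ (a₀ + n) 1).foldl
      (fun s i => s ++ pvIndented
        (PySem.Str.replace POD_XML_HEAD "{POD_ID}" (PySem.Int.toStr (id + i)))
        (lvl + i)) acc = acc ++ headsCat n (id + a₀) (lvl + a₀) := by
  induction n with
  | zero =>
    intro a₀ id lvl acc
    rw [PySem.List.pyRange_one_eq_nil (by omega)]
    simp [headsCat]
  | succ n ih =>
    intro a₀ id lvl acc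
    rw [PySem.List.pyRange_one_cons (by omega)]
    simp only [List.foldl_cons]
    have := ih (a₀ + 1) id lvl
      (acc ++ pvIndented
        (PySem.Str.replace POD_XML_HEAD "{POD_ID}" (PySem.Int.toStr (id + a₀)))
        (lvl + a₀))
    rw [show a₀ + (↑(n + 1) : Int) = a₀ + 1 + ↑n by push_cast; ring] at *
    rw [this]
    rw [show id + (a₀ + 1) = id + a₀ + 1 by ring, show lvl + (a₀ + 1) = lvl + a₀ + 1 by ring]
    simp [headsCat, headStr, String.append_assoc]

theorem tails_fold (n : Nat) : ∀ (lvl : Int) (acc : String),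
    (PySem.List.pyRange ((n : Int) - 1) (-1) (-1)).foldl
      (fun s i => s ++ (pvIndent (lvl + i) ++ "</body>\n")) acc
      = acc ++ tailsCat n lvl := by
  induction n with
  | zero =>
    intro lvl acc
    rw [PySem.List.pyRange_neg_one_eq_nil (by omega)]
    simp [tailsCat]
  | succ n ih =>
    intro lvl acc
    rw [show ((n + 1 : Nat) : Int) - 1 = (n : Int) by push_cast; ring]
    rw [PySem.List.pyRange_neg_one_cons (by omega)]
    simp only [List.foldl_cons]
    rw [ih lvl (acc ++ (pvIndent (lvl + n) ++ "</body>\n"))]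
    simp [tailsCat, tailStr, String.append_assoc]

theorem tailsCat_snoc (n : Nat) : ∀ (lvl : Int),
    tailsCat (n + 1) lvl = tailsCat n (lvl + 1) ++ tailStr lvl := by
  induction n with
  | zero => intro lvl; simp [tailsCat]
  | succ n ih =>
    intro lvl
    rw [show tailsCat (n + 1 + 1) lvl = tailStr (lvl + (n + 1)) ++ tailsCat (n + 1) lvl from rfl]
    rw [ih lvl]
    rw [show tailsCat (n + 1) (lvl + 1) = tailStr (lvl + 1 + n) ++ tailsCat n (lvl + 1) from rfl]
    rw [show (lvl + 1 + (n : Int)) = lvl + ((n : Int) + 1) by ring]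
    simp [String.append_assoc]

theorem ref_decomp (n : Nat) : ∀ (id lvl : Int),
    refSuffix n id lvl = headsCat n id lvl ++ (pvIndented FINGER_TIP_XML (lvl + n) ++ tailsCat n lvl) := by
  induction n with
  | zero => intro id lvl; simp [refSuffix, headsCat, tailsCat]
  | succ n ih =>
    intro id lvl
    rw [show refSuffix (n + 1) id lvl
        = headStr id lvl ++ (refSuffix n (id + 1) (lvl + 1) ++ tailStr lvl) from rfl]
    rw [ih (id + 1) (lvl + 1), tailsCat_snoc]
    rw [show headsCat (n + 1) id lvl = headStr id lvl ++ headsCat n (id + 1) (lvl + 1) from rfl]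
    rw [show (lvl + 1 + (n : Int)) = lvl + ((n : Int) + 1) by ring]
    simp [String.append_assoc]

theorem B_eq (xml : String) (id lvl pods : Int) :
    add_body_py_alt xml id lvl pods = xml ++ refSuffix pods.toNat id lvl := by
  rw [add_body_py_alt]
  by_cases h : pods ≤ 0
  · have : pods.toNat = 0 := by omega
    simp [h, this, refSuffix]
  · simp only [h, if_false]
    obtain ⟨n, hn⟩ : ∃ n : Nat, pods = (n : Int) + 1 := ⟨(pods - 1).toNat, by omega⟩
    subst hn
    have h1 := heads_fold (n + 1) 0 id lvl xml
    rw [show (0 : Int) + ((n + 1 : Nat) : Int) = (n : Int) + 1 by push_cast; ring] at h1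
    rw [h1]
    have h2 := tails_fold (n + 1) lvl
    rw [show (((n + 1 : Nat) : Int)) - 1 = (n : Int) + 1 - 1 by push_cast; ring] at h2
    rw [h2]
    rw [show ((n : Int) + 1).toNat = n + 1 by omega]
    rw [ref_decomp (n + 1) id lvl]
    rw [show (id + (0 : Int)) = id from by ring, show (lvl + (0 : Int)) = lvl from by ring]
    rw [show (lvl + ((n : Int) + 1)) = lvl + ((n + 1 : Nat) : Int) by push_cast; ring]
    simp [String.append_assoc]

-- ===== VERDICT (by name: the statement is the Claim_ definition above) =====
theorem add_body_py_spec : Claim_equal_add_body_py := by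
  intro xml id lvl pods _ hpre
  -- the ports are total, so the bound carried by hpre is not needed by the kernel proof
  have _hbound : pods ≤ 900 := hpre
  unfold Spec_add_body_py
  rw [A_eq pods.toNat pods rfl, B_eq]
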